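-- pv_equiv track=rewrite | github.com/ishandutta2007/codeforces | somethingnew/normal/1371/E2.py | ican
-- ===== SOURCE A (Python) =====
-- def ican(a, x):
--     k = x
--     wr = 0
--     for i in range(len(a)):
--         if a[i] <= k:
--             wr += 1
--         else:
--             wr -= a[i] - k
--             k = a[i]
--             if wr < 0:
--                 return False
--             wr += 1
--     return True
-- ===== SOURCE B (Python) =====
-- def ican(a, x):
--     # Feasible iff every element meets its own deadline: a[i] <= x + i.
--     # (The prefix-max constraint max(a[:i+1]) <= x+i is binding only at the
--     # index where each element first appears, since x+i grows by 1 each step.)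
--     return all(v <= x + i for i, v in enumerate(a))
-- ===== Notes on version B (the rewrite author's own statement) =====
-- stated objective: simpler
-- what changed: Replaces A's stateful greedy simulation (signed budget counter wr plus tracked level k) with a stateless closed-form pointwise criterion: all(a[i] <= x + i), correct because the prefix-max constraint is binding exactly at each element's own index.
import Mathlib
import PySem

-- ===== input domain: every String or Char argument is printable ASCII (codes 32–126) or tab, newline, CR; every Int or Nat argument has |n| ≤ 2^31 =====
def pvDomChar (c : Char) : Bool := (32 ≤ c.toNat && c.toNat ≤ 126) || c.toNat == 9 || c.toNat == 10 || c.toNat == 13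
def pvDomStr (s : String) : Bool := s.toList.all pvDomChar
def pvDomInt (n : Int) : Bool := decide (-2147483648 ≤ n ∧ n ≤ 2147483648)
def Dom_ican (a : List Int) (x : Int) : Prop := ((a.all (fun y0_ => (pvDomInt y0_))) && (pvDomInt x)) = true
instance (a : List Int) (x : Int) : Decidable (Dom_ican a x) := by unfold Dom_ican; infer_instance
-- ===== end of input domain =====

-- B replaces A's stateful greedy counter simulation with the stateless pointwise criterion a[i] ≤ x + i (objective: simpler).
-- ===== PORT A =====
def icanLoop : List Int → Int → Int → Bool
  | [], _, _ => true
  | v :: rest, k, wr =>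
      if v ≤ k then
        icanLoop rest k (wr + 1)
      else
        if wr - (v - k) < 0 then false
        else icanLoop rest v (wr - (v - k) + 1)

def ican (a : List Int) (x : Int) : Bool := icanLoop a x 0

-- ===== PORT B =====
-- B is `all(v <= x + i for i, v in enumerate(a))`: a stateless pass checking each element.
def icanAltLoop : List Int → Int → Int → Bool
  | [], _, _ => true
  | v :: rest, x, i => (decide (v ≤ x + i)) && icanAltLoop rest x (i + 1)

def ican_alt (a : List Int) (x : Int) : Bool := icanAltLoop a x 0

-- ===== PRECONDITION & SPEC =====
def Spec_ican (a : List Int) (x : Int) (out : Bool) : Prop := out = ican_alt a x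
instance (a : List Int) (x : Int) (out : Bool) : Decidable (Spec_ican a x out) := by unfold Spec_ican; infer_instance

-- ===== CLAIM (what is proved, stated in full; the proofs are below) =====
def Claim_equal_ican : Prop := ∀ (a : List Int) (x : Int), Dom_ican a x → Spec_ican a x (ican a x)

-- ===== LEMMAS AND PROOFS =====
-- Invariant: along a prefix with no early return, A's state satisfies wr = i - (k - x)
-- with k the running maximum, so k ≤ x + i; under that invariant both loops agree,
-- because the tests wr - (v - k) < 0 and v > x + i coincide.
theorem loop_eq (l : List Int) : ∀ (k x i : Int), k ≤ x + i →
    icanLoop l k (i - (k - x)) = icanAltLoop l x i := by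
  induction l with
  | nil => intro k x i h; rfl
  | cons v rest ih =>
    intro k x i h
    simp only [icanLoop, icanAltLoop]
    by_cases hv : v ≤ k
    · have hb : decide (v ≤ x + i) = true := by simp; omega
      simp only [hv, if_pos, hb, Bool.true_and]
      have e : i - (k - x) + 1 = (i + 1) - (k - x) := by ring
      rw [e]
      exact ih k x (i + 1) (by omega)
    · simp only [hv, if_neg, not_false_eq_true]
      by_cases hb : v ≤ x + i
      · have h1 : ¬ (i - (k - x) - (v - k) < 0) := by omega
        have hd : decide (v ≤ x + i) = true := by simp [hb]
        simp only [h1, if_neg, not_false_eq_true, hd, Bool.true_and]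
        have e : i - (k - x) - (v - k) + 1 = (i + 1) - (v - x) := by ring
        rw [e]
        exact ih v x (i + 1) (by omega)
      · have h1 : i - (k - x) - (v - k) < 0 := by omega
        have hd : decide (v ≤ x + i) = false := by simp [hb]
        simp only [h1, if_pos, hd, Bool.false_and]

-- ===== VERDICT (by name: the statement is the Claim_ definition above) =====
theorem ican_spec : Claim_equal_ican := by
  intro a x _
  unfold Spec_ican ican ican_alt
  have := loop_eq a x x 0 (by omega)
  simpa using this
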